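-- pv_equiv track=rewrite | github.com/Jinnie-J/Algorithm-study | programmers/소용돌이_수의합.py | solution
-- ===== SOURCE A (Python) =====
-- def solution(n):
--     answer = 0
--     arr = []
--     j = 1
--
--     for i in range(n):
--         arr.append([])
--         for _ in range(n):
--             arr[i].append(j)
--             j += 1
--
--     for k in range(n):
--         if k % 2 == 0:
--             answer += arr[k][k]
--         else:
--             answer += arr[k][n - k - 1]
--     return answer
-- ===== SOURCE B (Python) =====
-- def solution(n):
--     # Each grid value is determined by its position alone,
--     # so sum the diagonal entries directly without building the grid.
--     return sum(k * n + (k if k % 2 == 0 else n - k - 1) + 1 for k in range(n))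
-- ===== Notes on version B (the rewrite author's own statement) =====
-- stated objective: faster
-- what changed: B never builds the n*n grid: it computes each needed diagonal entry directly from its row and column position in one O(n) pass.
import Mathlib
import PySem

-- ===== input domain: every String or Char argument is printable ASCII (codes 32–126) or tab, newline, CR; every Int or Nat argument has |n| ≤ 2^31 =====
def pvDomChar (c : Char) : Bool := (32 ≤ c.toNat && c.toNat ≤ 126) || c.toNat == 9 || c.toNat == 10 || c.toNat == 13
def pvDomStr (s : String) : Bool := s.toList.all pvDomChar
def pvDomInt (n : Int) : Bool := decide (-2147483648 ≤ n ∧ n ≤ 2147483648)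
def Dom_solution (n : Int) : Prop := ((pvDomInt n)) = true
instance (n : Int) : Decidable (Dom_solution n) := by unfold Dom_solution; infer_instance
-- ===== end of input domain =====

-- B avoids building the n×n grid and computes each diagonal entry directly from its position (one O(n) pass).

-- ===== PORT A =====
-- literal port: build the n×n grid row by row with a running counter j, then sum the zig-zag diagonal
def solution (n : Int) : Int :=
  let st :=
    (PySem.List.pyRange 0 n 1).foldl
      (fun (st : List (List Int) × Int) i =>
        let arr := st.1 ++ [[]]
        (PySem.List.pyRange 0 n 1).foldl
          (fun (st2 : List (List Int) × Int) _ =>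
            (st2.1.modify i.toNat (fun row => row ++ [st2.2]), st2.2 + 1))
          (arr, st.2))
      ([], 1)
  (PySem.List.pyRange 0 n 1).foldl
    (fun answer k =>
      if PySem.Int.mod k 2 == 0 then
        answer + PySem.List.pyGetD (PySem.List.pyGetD st.1 k []) k 0
      else
        answer + PySem.List.pyGetD (PySem.List.pyGetD st.1 k []) (n - k - 1) 0)
    0

-- ===== PORT B =====
-- port of Source B: sum(k*n + (k if k % 2 == 0 else n - k - 1) + 1 for k in range(n))
def solution_alt (n : Int) : Int :=
  (PySem.List.pyRange 0 n 1).foldl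
    (fun acc k =>
      acc + (k * n + (if PySem.Int.mod k 2 == 0 then k else n - k - 1) + 1))
    0

-- ===== PRECONDITION & SPEC =====
def Spec_solution (n : Int) (out : Int) : Prop := out = solution_alt n
instance (n : Int) (out : Int) : Decidable (Spec_solution n out) := by unfold Spec_solution; infer_instance

-- ===== CLAIM (what is proved, stated in full; the proofs are below) =====
def Claim_equal_solution : Prop := ∀ (n : Int), Dom_solution n → Spec_solution n (solution n)

-- ===== LEMMAS AND PROOFS =====

-- modifying the last element of arr ++ [row]
theorem pv_modify_last {α : Type} (arr : List α) (row : α) (f : α → α) :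
    (arr ++ [row]).modify arr.length f = arr ++ [f row] := by
  induction arr with
  | nil => simp [List.modify_cons]
  | cons a t ih => simp [ih]

-- shifting the start of a consecutive run
theorem pv_shift (j : Int) (m : Nat) :
    (List.range (m + 1)).map (fun t : Nat => j + (t : Int))
      = j :: (List.range m).map (fun t : Nat => (j + 1) + (t : Int)) := by
  rw [List.range_succ_eq_map, List.map_cons, List.map_map]
  simp only [Nat.cast_zero, add_zero]
  congr 1
  apply List.map_congr_left
  intro a _
  simp only [Function.comp_apply]
  push_cast
  ring

-- the inner loop appends consecutive values j, j+1, … to the last row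
theorem pv_inner (l : List Int) : ∀ (arr : List (List Int)) (row : List Int) (j i : Int),
    i.toNat = arr.length →
    l.foldl
      (fun (st2 : List (List Int) × Int) _ =>
        (st2.1.modify i.toNat (fun row => row ++ [st2.2]), st2.2 + 1))
      (arr ++ [row], j)
    = (arr ++ [row ++ (List.range l.length).map (fun t : Nat => j + (t : Int))], j + l.length) := by
  induction l with
  | nil => intro arr row j i hi; simp
  | cons x xs ih =>
    intro arr row j i hi
    simp only [List.foldl_cons, List.length_cons]
    rw [hi, pv_modify_last, ← hi, ih arr (row ++ [j]) (j + 1) i hi, pv_shift]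
    simp only [Prod.mk.injEq]
    constructor
    · simp
    · push_cast; ring

-- the grid-building fold: rows are [i*L+1, …, i*L+L] where L is the inner-loop length
theorem pv_outer (n : Int) (m : Nat) :
    (PySem.List.pyRange 0 (m : Int) 1).foldl
      (fun (st : List (List Int) × Int) i =>
        let arr := st.1 ++ [[]]
        (PySem.List.pyRange 0 n 1).foldl
          (fun (st2 : List (List Int) × Int) _ =>
            (st2.1.modify i.toNat (fun row => row ++ [st2.2]), st2.2 + 1))
          (arr, st.2))
      ([], 1)
    = ((List.range m).map
        (fun i : Nat => (List.range (PySem.List.pyRange 0 n 1).length).map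
          (fun t : Nat => (i : Int) * ((PySem.List.pyRange 0 n 1).length : Int) + 1 + (t : Int))),
       (m : Int) * (PySem.List.pyRange 0 n 1).length + 1) := by
  induction m with
  | zero => simp [PySem.List.pyRange_one_eq_nil]
  | succ m ih =>
    have hsplit : PySem.List.pyRange 0 ((m : Int) + 1) 1
        = PySem.List.pyRange 0 (m : Int) 1 ++ [(m : Int)] :=
      PySem.List.pyRange_one_succ_right (by positivity)
    push_cast
    rw [hsplit, List.foldl_append, ih]
    simp only [List.foldl_cons, List.foldl_nil]
    rw [pv_inner _ _ [] _ _ (by simp)]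
    simp only [Prod.mk.injEq]
    constructor
    · rw [List.range_succ, List.map_append]
      simp
    · ring

theorem solution_eq (n : Int) : solution n = solution_alt n := by
  by_cases hpos : 0 < n
  case neg =>
    simp only [solution, solution_alt, PySem.List.pyRange_one_eq_nil (by omega : n ≤ 0)]
    simp
  case pos =>
    have hn : PySem.List.pyRange 0 n 1 = PySem.List.pyRange 0 ((n.toNat : Int)) 1 := by
      congr 1; omega
    have hlen : ((PySem.List.pyRange 0 ((n.toNat : Int)) 1).length : Int) = n := by
      rw [PySem.List.length_pyRange_one]; omega
    simp only [solution, solution_alt]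
    rw [hn, pv_outer ((n.toNat : Int)) n.toNat]
    simp only
    apply PySem.List.foldl_congr_mem
    intro acc k hk
    have hk' := PySem.List.mem_pyRange_one.mp hk
    have hkn : k < n := by
      have := hk'.2; omega
    have h0k : 0 ≤ k := hk'.1
    have hrow : PySem.List.pyGetD
        ((List.range n.toNat).map
          (fun i : Nat => (List.range (PySem.List.pyRange 0 ((n.toNat : Int)) 1).length).map
            (fun t : Nat => (i : Int) * ((PySem.List.pyRange 0 ((n.toNat : Int)) 1).length : Int) + 1 + (t : Int)))) k []
        = (List.range (PySem.List.pyRange 0 ((n.toNat : Int)) 1).length).map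
            (fun t : Nat => k * ((PySem.List.pyRange 0 ((n.toNat : Int)) 1).length : Int) + 1 + (t : Int)) := by
      have : k = ((k.toNat : Int)) := by omega
      rw [this, PySem.List.pyGetD_natCast,
          PySem.List.getD_map_range _ _ _ _ (by omega)]
    rw [hrow]
    have hentry : ∀ j : Int, 0 ≤ j → j < n →
        PySem.List.pyGetD
          ((List.range (PySem.List.pyRange 0 ((n.toNat : Int)) 1).length).map
            (fun t : Nat => k * ((PySem.List.pyRange 0 ((n.toNat : Int)) 1).length : Int) + 1 + (t : Int))) j 0
        = k * n + 1 + j := by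
      intro j h0 hj
      have hj' : j = ((j.toNat : Int)) := by omega
      rw [hj', PySem.List.pyGetD_natCast,
          PySem.List.getD_map_range _ _ _ _ (by omega), hlen]
    split
    · rw [hentry k h0k hkn]; ring
    · rw [hentry (n - k - 1) (by omega) (by omega)]; ring

-- ===== VERDICT (by name: the statement is the Claim_ definition above) =====
theorem solution_spec : Claim_equal_solution := by
  intro n _
  unfold Spec_solution
  exact solution_eq n
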